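-- pv_equiv track=rewrite | github.com/JIKMAN/coding-test | python/81302.py | bfs
-- ===== SOURCE A (Python) =====
-- from collections import deque
--
-- def bfs(place):
--     start = []
--
--     for i in range(5):
--         for j in range(5):
--             if place[i][j] == "P":
--                 start.append([i, j])
--
--     for s in start:
--         q = deque([s])
--         visit = [[False] * 5 for i in range(5)]
--         dist = [[0] * 5 for i in range(5)]
--         visit[s[0]][s[1]] = True
--
--         while q:
--             x, y = q.popleft()
--
--             dx = [-1, 0, 1, 0]
--             dy = [0, -1, 0, 1]
--
--             for i in range(4):
--                 nx = x + dx[i]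
--                 ny = y + dy[i]
--
--                 if 0 <= nx < 5 and 0 <= ny < 5 and visit[nx][ny] == False:
--                     if place[nx][ny] == 'O':
--                         q.append([nx, ny])
--                         visit[nx][ny] = True
--                         dist[nx][ny] = dist[x][y] + 1
--
--                     if place[nx][ny] == 'P' and dist[x][y] <= 1:
--                         return 0
--     return 1
-- ===== SOURCE B (Python) =====
-- def bfs(place):
--     # Direct neighborhood test instead of BFS: two P's violate distancing iff
--     # they are at taxicab distance 1, or at distance 2 with an 'O' on a shortest path.
--     def ok(x, y):
--         return 0 <= x < 5 and 0 <= y < 5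
--
--     for i in range(5):
--         for j in range(5):
--             if place[i][j] != 'P':
--                 continue
--             if any(ok(i + di, j + dj) and place[i + di][j + dj] == 'P'
--                    for di, dj in ((1, 0), (0, 1), (-1, 0), (0, -1))):
--                 return 0
--             if any(ok(i + di, j + dj) and place[i + di][j + dj] == 'P'
--                    and place[i + di // 2][j + dj // 2] == 'O'
--                    for di, dj in ((2, 0), (-2, 0), (0, 2), (0, -2))):
--                 return 0
--             if any(ok(i + di, j + dj) and place[i + di][j + dj] == 'P'
--                    and (place[i][j + dj] == 'O' or place[i + di][j] == 'O')
--                    for di, dj in ((1, 1), (1, -1), (-1, 1), (-1, -1))):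
--                 return 0
--     return 1
-- ===== Notes on version B (the rewrite author's own statement) =====
-- stated objective: idiomatic
-- what changed: B replaces the per-'P' BFS with queue/visited/dist arrays by a direct constant-size neighbourhood test: adjacent 'P', straight distance-2 'P' with its 'O' middle, or diagonal 'P' with either 'O' middle.
import Mathlib
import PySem

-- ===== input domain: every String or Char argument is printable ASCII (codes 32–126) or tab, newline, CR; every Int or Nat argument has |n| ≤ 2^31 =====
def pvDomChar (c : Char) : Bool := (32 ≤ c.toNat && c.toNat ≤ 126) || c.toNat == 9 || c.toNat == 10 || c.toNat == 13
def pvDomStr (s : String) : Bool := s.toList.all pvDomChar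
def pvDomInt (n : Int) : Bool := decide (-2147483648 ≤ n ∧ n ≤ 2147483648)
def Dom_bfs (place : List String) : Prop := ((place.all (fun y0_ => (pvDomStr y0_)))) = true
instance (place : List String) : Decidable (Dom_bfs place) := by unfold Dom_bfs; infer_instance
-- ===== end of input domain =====

-- B replaces the per-'P' breadth-first search with a direct constant-size neighbourhood test
-- (distance-1 neighbours, straight distance-2 with its 'O' middle, diagonals with either 'O' middle).

-- ===== PORT A =====

-- place[i][j]; the ' '/"" defaults are only reachable outside Pre_bfs (where Python raises IndexError)
def pvCell (place : List String) (i j : Int) : Char :=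
  (PySem.List.pyGet? ((PySem.List.pyGet? place i).getD "").toList j).getD ' '

-- dx/dy direction table of A, in A's order
def pvDirs : List (Int × Int) := [(-1, 0), (0, -1), (1, 0), (0, 1)]

-- functional update of a 5×5 array-of-arrays at one cell
def pvUpd {α : Type} (f : Int → Int → α) (x y : Int) (v : α) : Int → Int → α :=
  fun i j => if i = x ∧ j = y then v else f i j

-- 0 <= x < 5 bounds check (shared by both ports, like pvCell)
def pvInb (x : Int) : Bool := decide (0 ≤ x) && decide (x < 5)

-- the inner 'for i in range(4)' loop of A; none = the 'return 0' was taken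
def pvStep (place : List String) (x y : Int) :
    List (Int × Int) → List (Int × Int) → (Int → Int → Bool) → (Int → Int → Int) →
    Option (List (Int × Int) × (Int → Int → Bool) × (Int → Int → Int))
  | [], q, visit, dist => some (q, visit, dist)
  | (dx, dy) :: ds, q, visit, dist =>
    let nx := x + dx
    let ny := y + dy
    if pvInb nx && pvInb ny && (visit nx ny == false) then
      let q' := if pvCell place nx ny == 'O' then q ++ [(nx, ny)] else q
      let visit' := if pvCell place nx ny == 'O' then pvUpd visit nx ny true else visit
      let dist' := if pvCell place nx ny == 'O' then pvUpd dist nx ny (dist x y + 1) else dist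
      -- Python reads dist[x][y] here; the update above is at (nx,ny) ≠ (x,y), so its value is dist x y
      if pvCell place nx ny == 'P' && decide (dist x y ≤ 1) then none
      else pvStep place x y ds q' visit' dist'
    else pvStep place x y ds q visit dist

-- the 'while q' loop; each cell is enqueued at most once, so 25 units of fuel never run out
def pvLoop (place : List String) : Nat → List (Int × Int) → (Int → Int → Bool) → (Int → Int → Int) → Bool
  | _, [], _, _ => false
  | 0, _ :: _, _, _ => false
  | fuel + 1, (x, y) :: rest, visit, dist =>
    match pvStep place x y pvDirs rest visit dist with
    | none => true
    | some (q', visit', dist') => pvLoop place fuel q' visit' dist'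

def pvBfsFrom (place : List String) (s : Int × Int) : Bool :=
  pvLoop place 25 [s] (pvUpd (fun _ _ => false) s.1 s.2 true) (fun _ _ => 0)

-- the start-collection double loop of A
def pvStarts (place : List String) : List (Int × Int) :=
  (PySem.List.pyRange 0 5 1).foldl
    (fun acc i =>
      (PySem.List.pyRange 0 5 1).foldl
        (fun acc j => if pvCell place i j == 'P' then acc ++ [(i, j)] else acc) acc)
    []

-- the 'for s in start' loop
def pvRun (place : List String) : List (Int × Int) → Int
  | [] => 1
  | s :: rest => if pvBfsFrom place s then 0 else pvRun place rest

def bfs (place : List String) : Int := pvRun place (pvStarts place)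

-- ===== PORT B =====

def pvAdjD : List (Int × Int) := [(1, 0), (0, 1), (-1, 0), (0, -1)]
def pvTwoD : List (Int × Int) := [(2, 0), (-2, 0), (0, 2), (0, -2)]
def pvDiagD : List (Int × Int) := [(1, 1), (1, -1), (-1, 1), (-1, -1)]

-- the three any(...) tests of Source B for one 'P' cell
def pvCheck (place : List String) (i j : Int) : Bool :=
  (pvCell place i j == 'P') &&
  ((pvAdjD.any fun d =>
      pvInb (i + d.1) && pvInb (j + d.2) && (pvCell place (i + d.1) (j + d.2) == 'P')) ||
   (pvTwoD.any fun d =>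
      pvInb (i + d.1) && pvInb (j + d.2) && (pvCell place (i + d.1) (j + d.2) == 'P') &&
      (pvCell place (i + PySem.Int.floordiv d.1 2) (j + PySem.Int.floordiv d.2 2) == 'O')) ||
   (pvDiagD.any fun d =>
      pvInb (i + d.1) && pvInb (j + d.2) && (pvCell place (i + d.1) (j + d.2) == 'P') &&
      ((pvCell place i (j + d.2) == 'O') || (pvCell place (i + d.1) j == 'O'))))

def bfs_alt (place : List String) : Int :=
  if (PySem.List.pyRange 0 5 1).any
      (fun i => (PySem.List.pyRange 0 5 1).any (fun j => pvCheck place i j))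
  then 0 else 1

-- ===== PRECONDITION & SPEC =====

-- exactly where A returns: 5 rows are indexed and columns 0..4 of each of the first 5 rows
-- (anything less raises IndexError in Python A)
def Pre_bfs (place : List String) : Prop :=
  5 ≤ place.length ∧ ∀ r ∈ place.take 5, 5 ≤ r.toList.length

instance (place : List String) : Decidable (Pre_bfs place) := by unfold Pre_bfs; infer_instance

def pvWitness_bfs : List String := ["OPOOO", "OOOOO", "OOPOO", "OOOOO", "POOOO"]

def Spec_bfs (place : List String) (out : Int) : Prop := out = bfs_alt place
instance (place : List String) (out : Int) : Decidable (Spec_bfs place out) := by unfold Spec_bfs; infer_instance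

-- ===== CLAIM (what is proved, stated in full; the proofs are below) =====
def Claim_equal_bfs : Prop := ∀ (place : List String), Dom_bfs place → Pre_bfs place → Spec_bfs place (bfs place)

-- ===== LEMMAS AND PROOFS =====

-- Prop version of the neighbourhood test (without the 'P at (a,b)' guard)
def pvKP (place : List String) (a b : Int) : Prop :=
  (∃ d ∈ pvAdjD, pvInb (a + d.1) = true ∧ pvInb (b + d.2) = true ∧
      pvCell place (a + d.1) (b + d.2) = 'P') ∨
  (∃ d ∈ pvTwoD, pvInb (a + d.1) = true ∧ pvInb (b + d.2) = true ∧
      pvCell place (a + d.1) (b + d.2) = 'P' ∧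
      pvCell place (a + PySem.Int.floordiv d.1 2) (b + PySem.Int.floordiv d.2 2) = 'O') ∨
  (∃ d ∈ pvDiagD, pvInb (a + d.1) = true ∧ pvInb (b + d.2) = true ∧
      pvCell place (a + d.1) (b + d.2) = 'P' ∧
      (pvCell place a (b + d.2) = 'O' ∨ pvCell place (a + d.1) b = 'O'))

theorem pvCheck_iff (place : List String) (a b : Int) :
    pvCheck place a b = true ↔ (pvCell place a b = 'P' ∧ pvKP place a b) := by
  simp only [pvCheck, pvKP, Bool.and_eq_true, Bool.or_eq_true, List.any_eq_true,
    beq_iff_eq, and_assoc, or_assoc]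


-- the loop invariant of A's BFS from start (a,b)
def pvInv (place : List String) (a b : Int) (q : List (Int × Int))
    (v : Int → Int → Bool) (d : Int → Int → Int) : Prop :=
  v a b = true ∧
  (∀ x y, v x y = true → (x = a ∧ y = b) ∨ pvCell place x y = 'O') ∧
  (∀ m ∈ q, v m.1 m.2 = true ∧ 0 ≤ d m.1 m.2 ∧
      (d m.1 m.2 = 0 → m = (a, b)) ∧
      (d m.1 m.2 = 1 → pvCell place m.1 m.2 = 'O' ∧ ∃ e ∈ pvDirs, m = (a + e.1, b + e.2)))

def pvGrid : List (Int × Int) :=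
  (PySem.List.pyRange 0 5 1).flatMap fun i => (PySem.List.pyRange 0 5 1).map fun j => (i, j)

def pvUc (v : Int → Int → Bool) : Nat := pvGrid.countP fun c => !v c.1 c.2

theorem pvInb_iff (x : Int) : pvInb x = true ↔ 0 ≤ x ∧ x < 5 := by
  simp [pvInb]

theorem pvMem_grid (x y : Int) (hx : pvInb x = true) (hy : pvInb y = true) :
    (x, y) ∈ pvGrid := by
  rw [pvInb_iff] at hx hy
  simp only [pvGrid, List.mem_flatMap, List.mem_map]
  refine ⟨x, ?_, y, ?_, rfl⟩ <;> rw [PySem.List.mem_pyRange_one] <;> omega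


theorem pvUc_upd (v : Int → Int → Bool) (x y : Int)
    (hx : pvInb x = true) (hy : pvInb y = true) (hv : v x y = false) :
    pvUc (pvUpd v x y true) + 1 = pvUc v := by
  have key : ∀ (l : List (Int × Int)), l.Nodup → (x, y) ∈ l →
      (l.countP fun c => !(pvUpd v x y true) c.1 c.2) + 1 = l.countP fun c => !v c.1 c.2 := by
    intro l hnd hmem
    induction l with
    | nil => simp at hmem
    | cons hd tl ih =>
      rcases List.mem_cons.mp hmem with h | h
      · subst h
        have htl : (x, y) ∉ tl := (List.nodup_cons.mp hnd).1
        have hcong : (tl.countP fun c => !(pvUpd v x y true) c.1 c.2) =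
            tl.countP fun c => !v c.1 c.2 := by
          apply List.countP_congr
          intro c hc
          have hne : c ≠ (x, y) := fun h => htl (h ▸ hc)
          have : ¬(c.1 = x ∧ c.2 = y) := by
            intro hh
            exact hne (Prod.ext hh.1 hh.2)
          simp [pvUpd, this]
        rw [List.countP_cons, List.countP_cons, hcong]
        have hfalse : (!pvUpd v x y true (x, y).1 (x, y).2) = false := by simp [pvUpd]
        have htrue : (!v (x, y).1 (x, y).2) = true := by simp [hv]
        rw [hfalse, htrue]
        simp
      · have hhd : hd ≠ (x, y) := by
          rintro rfl
          exact (List.nodup_cons.mp hnd).1 h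
        have : ¬(hd.1 = x ∧ hd.2 = y) := by
          intro hh
          exact hhd (Prod.ext hh.1 hh.2)
        have ihr := ih (List.nodup_cons.mp hnd).2 h
        rw [List.countP_cons, List.countP_cons]
        have hh : (!pvUpd v x y true hd.1 hd.2) = (!v hd.1 hd.2) := by simp [pvUpd, this]
        rw [hh]
        omega
  exact key pvGrid (by decide) (pvMem_grid x y hx hy)


theorem pvDir_ne (x y : Int) (e : Int × Int) (he : e ∈ pvDirs) :
    (x + e.1, y + e.2) ≠ (x, y) := by
  fin_cases he <;> simp <;> omega



theorem pvUpd_self {α : Type} (f : Int → Int → α) (x y : Int) (v : α) :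
    pvUpd f x y v x y = v := by simp [pvUpd]

theorem pvUpd_ne {α : Type} (f : Int → Int → α) (x y i j : Int) (v : α)
    (h : ¬(i = x ∧ j = y)) : pvUpd f x y v i j = f i j := by simp [pvUpd, h]

-- everything pvStep can do when it does not return 0
theorem pvStep_some (place : List String) (x y : Int) :
    ∀ (dirs q : List (Int × Int)) v d q' v' d',
    dirs.Sublist pvDirs →
    pvStep place x y dirs q v d = some (q', v', d') →
    (∀ i j, v i j = true → v' i j = true) ∧
    (∀ i j, v' i j = true → v i j = true ∨ pvCell place i j = 'O') ∧
    (∀ i j, v i j = true → d' i j = d i j) ∧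
    (∀ m ∈ q, m ∈ q') ∧
    (∀ m ∈ q', m ∈ q ∨ (pvCell place m.1 m.2 = 'O' ∧ v' m.1 m.2 = true ∧
        d' m.1 m.2 = d x y + 1 ∧ ∃ e ∈ dirs, m = (x + e.1, y + e.2))) ∧
    (q'.length + pvUc v' ≤ q.length + pvUc v) ∧
    (∀ e ∈ dirs, pvInb (x + e.1) = true → pvInb (y + e.2) = true →
        v (x + e.1) (y + e.2) = false → pvCell place (x + e.1) (y + e.2) = 'O' →
        (x + e.1, y + e.2) ∈ q' ∧ d' (x + e.1) (y + e.2) = d x y + 1) := by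
  intro dirs
  induction dirs with
  | nil =>
    intro q v d q' v' d' _ h
    simp only [pvStep, Option.some.injEq, Prod.mk.injEq] at h
    obtain ⟨h1, h2, h3⟩ := h
    subst h1; subst h2; subst h3
    refine ⟨fun _ _ h => h, fun _ _ h => Or.inl h, fun _ _ _ => rfl, fun m hm => hm,
      fun m hm => Or.inl hm, le_rfl, fun e he => absurd he (by simp)⟩
  | cons hd ds ih =>
    obtain ⟨dx, dy⟩ := hd
    intro q v d q' v' d' hsub h
    have hsub' : ds.Sublist pvDirs := (List.sublist_cons_self (dx, dy) ds).trans hsub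
    have hhd : (dx, dy) ∈ pvDirs := hsub.subset List.mem_cons_self
    have hxne : ¬(x = x + dx ∧ y = y + dy) := by
      intro hh
      exact pvDir_ne x y (dx, dy) hhd (by simp [← hh.1, ← hh.2])
    simp only [pvStep] at h
    by_cases hc : (pvInb (x + dx) && pvInb (y + dy) && (v (x + dx) (y + dy) == false)) = true
    · rw [if_pos hc] at h
      simp only [Bool.and_eq_true, beq_iff_eq] at hc
      by_cases hp : (pvCell place (x + dx) (y + dy) == 'P' && decide (d x y ≤ 1)) = true
      · rw [if_pos hp] at h
        exact absurd h (by simp)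
      · rw [if_neg hp] at h
        by_cases hO : (pvCell place (x + dx) (y + dy) == 'O') = true
        · rw [if_pos hO, if_pos hO, if_pos hO] at h
          simp only [beq_iff_eq] at hO
          obtain ⟨g1, g2, g3, g4, g5, g6, g7⟩ := ih _ _ _ _ _ _ hsub' h
          have hv1 : ∀ i j, v i j = true → pvUpd v (x + dx) (y + dy) true i j = true := by
            intro i j hv
            by_cases hne : (i = x + dx ∧ j = y + dy)
            · rw [hne.1, hne.2, pvUpd_self]
            · rwa [pvUpd_ne _ _ _ _ _ _ hne]
          have hdp : ∀ i j, v i j = true → pvUpd d (x + dx) (y + dy) (d x y + 1) i j = d i j := by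
            intro i j hv
            by_cases hne : (i = x + dx ∧ j = y + dy)
            · exfalso
              rw [hne.1, hne.2] at hv
              rw [hv] at hc
              exact absurd hc.2 (by simp)
            · rw [pvUpd_ne _ _ _ _ _ _ hne]
          have hnew : (x + dx, y + dy) ∈ q' ∧ d' (x + dx) (y + dy) = d x y + 1 := by
            constructor
            · exact g4 _ (by simp)
            · rw [g3 _ _ (pvUpd_self v _ _ _)]
              exact pvUpd_self d _ _ _
          refine ⟨?_, ?_, ?_, ?_, ?_, ?_, ?_⟩
          · intro i j hv
            exact g1 _ _ (hv1 _ _ hv)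
          · intro i j hv
            rcases g2 _ _ hv with hv' | hOij
            · by_cases hne : (i = x + dx ∧ j = y + dy)
              · exact Or.inr (hne.1 ▸ hne.2 ▸ hO)
              · rw [pvUpd_ne _ _ _ _ _ _ hne] at hv'
                exact Or.inl hv'
            · exact Or.inr hOij
          · intro i j hv
            rw [g3 _ _ (hv1 _ _ hv)]
            exact hdp _ _ hv
          · intro m hm
            exact g4 _ (List.mem_append_left _ hm)
          · intro m hm
            rcases g5 _ hm with hm' | hnewm
            · rcases List.mem_append.mp hm' with hm'' | hm''
              · exact Or.inl hm''
              · rcases List.mem_singleton.mp hm'' with rfl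
                exact Or.inr ⟨hO, g1 _ _ (pvUpd_self v _ _ _), hnew.2,
                  (dx, dy), List.mem_cons_self, rfl⟩
            · obtain ⟨hOm, hvm, hdm, e, he, hme⟩ := hnewm
              rw [pvUpd_ne _ _ _ _ _ _ hxne] at hdm
              exact Or.inr ⟨hOm, hvm, hdm, e, List.mem_cons_of_mem _ he, hme⟩
          · have huc : pvUc (pvUpd v (x + dx) (y + dy) true) + 1 = pvUc v :=
              pvUc_upd v _ _ hc.1.1 hc.1.2 hc.2
            have := g6
            simp only [List.length_append, List.length_singleton] at this
            omega
          · intro e he hi1 hi2 hve hOe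
            rcases List.mem_cons.mp he with rfl | he'
            · exact hnew
            · by_cases hne : ((x + e.1) = (x + dx) ∧ (y + e.2) = (y + dy))
              · rw [hne.1, hne.2]
                exact hnew
              · have h7 := g7 _ he' hi1 hi2 (by rwa [pvUpd_ne _ _ _ _ _ _ hne]) hOe
                rw [pvUpd_ne _ _ _ _ _ _ hxne] at h7
                exact h7
        · rw [if_neg hO, if_neg hO, if_neg hO] at h
          obtain ⟨g1, g2, g3, g4, g5, g6, g7⟩ := ih _ _ _ _ _ _ hsub' h
          refine ⟨g1, g2, g3, g4, ?_, g6, ?_⟩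
          · intro m hm
            rcases g5 _ hm with hm' | ⟨hOm, hvm, hdm, e, he, hme⟩
            · exact Or.inl hm'
            · exact Or.inr ⟨hOm, hvm, hdm, e, List.mem_cons_of_mem _ he, hme⟩
          · intro e he hi1 hi2 hve hOe
            rcases List.mem_cons.mp he with rfl | he'
            · exact absurd hOe (by simpa using hO)
            · exact g7 _ he' hi1 hi2 hve hOe
    · rw [if_neg hc] at h
      obtain ⟨g1, g2, g3, g4, g5, g6, g7⟩ := ih _ _ _ _ _ _ hsub' h
      refine ⟨g1, g2, g3, g4, ?_, g6, ?_⟩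
      · intro m hm
        rcases g5 _ hm with hm' | ⟨hOm, hvm, hdm, e, he, hme⟩
        · exact Or.inl hm'
        · exact Or.inr ⟨hOm, hvm, hdm, e, List.mem_cons_of_mem _ he, hme⟩
      · intro e he hi1 hi2 hve hOe
        rcases List.mem_cons.mp he with rfl | he'
        · exfalso
          apply hc
          simp only [Bool.and_eq_true, beq_iff_eq]
          exact ⟨⟨hi1, hi2⟩, hve⟩
        · exact g7 _ he' hi1 hi2 hve hOe


theorem pvStep_none_sound (place : List String) (x y : Int) :
    ∀ (dirs q : List (Int × Int)) v d,
    dirs.Sublist pvDirs →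
    pvStep place x y dirs q v d = none →
    ∃ e ∈ dirs, pvInb (x + e.1) = true ∧ pvInb (y + e.2) = true ∧
      v (x + e.1) (y + e.2) = false ∧ pvCell place (x + e.1) (y + e.2) = 'P' ∧ d x y ≤ 1 := by
  intro dirs
  induction dirs with
  | nil =>
    intro q v d _ h
    simp [pvStep] at h
  | cons e ds ih =>
    obtain ⟨dx, dy⟩ := e
    intro q v d hsub h
    have hsub' : ds.Sublist pvDirs := (List.sublist_cons_self (dx, dy) ds).trans hsub
    have hhd : (dx, dy) ∈ pvDirs := hsub.subset (List.mem_cons_self)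
    simp only [pvStep] at h
    by_cases hc : (pvInb (x + dx) && pvInb (y + dy) && (v (x + dx) (y + dy) == false)) = true
    · rw [if_pos hc] at h
      simp only [Bool.and_eq_true, beq_iff_eq] at hc
      by_cases hp : (pvCell place (x + dx) (y + dy) == 'P' && decide (d x y ≤ 1)) = true
      · simp only [Bool.and_eq_true, beq_iff_eq, decide_eq_true_eq] at hp
        exact ⟨(dx, dy), List.mem_cons_self, hc.1.1, hc.1.2, hc.2, hp.1, hp.2⟩
      · rw [if_neg hp] at h
        obtain ⟨e', he', hi1, hi2, hv', hP', hd'⟩ := ih _ _ _ hsub' h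
        refine ⟨e', List.mem_cons_of_mem _ he', hi1, hi2, ?_, hP', ?_⟩
        · -- v' at the P cell equals v there (only an 'O' cell may have been visited)
          by_cases hO : (pvCell place (x + dx) (y + dy) == 'O') = true
          · rw [if_pos hO] at hv'
            simp only [beq_iff_eq] at hO
            by_cases hne : ((x + e'.1) = (x + dx) ∧ (y + e'.2) = (y + dy))
            · exfalso
              rw [hne.1, hne.2] at hP'
              exact absurd (hP'.symm.trans hO) (by decide)
            · rwa [pvUpd_ne _ _ _ _ _ _ hne] at hv'
          · rwa [if_neg hO] at hv'
        · by_cases hO : (pvCell place (x + dx) (y + dy) == 'O') = true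
          · rw [if_pos hO] at hd'
            have hxne : ¬(x = x + dx ∧ y = y + dy) := by
              intro hh
              have := pvDir_ne x y (dx, dy) hhd
              exact this (by simp [← hh.1, ← hh.2])
            rwa [pvUpd_ne _ _ _ _ _ _ hxne] at hd'
          · rwa [if_neg hO] at hd'
    · rw [if_neg hc] at h
      obtain ⟨e', he', rest⟩ := ih _ _ _ hsub' h
      exact ⟨e', List.mem_cons_of_mem _ he', rest⟩


theorem pvStep_none_of_trigger (place : List String) (x y : Int) :
    ∀ (dirs q : List (Int × Int)) v d e,
    dirs.Sublist pvDirs → e ∈ dirs →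
    pvInb (x + e.1) = true → pvInb (y + e.2) = true →
    v (x + e.1) (y + e.2) = false → pvCell place (x + e.1) (y + e.2) = 'P' → d x y ≤ 1 →
    pvStep place x y dirs q v d = none := by
  intro dirs
  induction dirs with
  | nil =>
    intro q v d e _ he
    simp at he
  | cons hd ds ih =>
    obtain ⟨dx, dy⟩ := hd
    intro q v d e hsub he hi1 hi2 hv hP hd1
    have hsub' : ds.Sublist pvDirs := (List.sublist_cons_self (dx, dy) ds).trans hsub
    have hhd : (dx, dy) ∈ pvDirs := hsub.subset List.mem_cons_self
    simp only [pvStep]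
    rcases List.mem_cons.mp he with rfl | he'
    · -- the trigger direction is the head: the branch is entered and returns 0
      have hc : (pvInb (x + dx) && pvInb (y + dy) && (v (x + dx) (y + dy) == false)) = true := by
        simp only [Bool.and_eq_true, beq_iff_eq]
        exact ⟨⟨hi1, hi2⟩, hv⟩
      rw [if_pos hc]
      have hp : (pvCell place (x + dx) (y + dy) == 'P' && decide (d x y ≤ 1)) = true := by
        simp only [Bool.and_eq_true, beq_iff_eq, decide_eq_true_eq]
        exact ⟨hP, hd1⟩
      rw [if_pos hp]
    · by_cases hc : (pvInb (x + dx) && pvInb (y + dy) && (v (x + dx) (y + dy) == false)) = true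
      · rw [if_pos hc]
        by_cases hp : (pvCell place (x + dx) (y + dy) == 'P' && decide (d x y ≤ 1)) = true
        · rw [if_pos hp]
        · rw [if_neg hp]
          -- recurse: the trigger cell is a 'P' cell, so it cannot be the freshly visited 'O' cell
          apply ih _ _ _ _ hsub' he' hi1 hi2 ?_ hP ?_
          · by_cases hO : (pvCell place (x + dx) (y + dy) == 'O') = true
            · rw [if_pos hO]
              simp only [beq_iff_eq] at hO
              by_cases hne : ((x + e.1) = (x + dx) ∧ (y + e.2) = (y + dy))
              · exfalso
                rw [hne.1, hne.2] at hP
                exact absurd (hP.symm.trans hO) (by decide)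
              · rw [pvUpd_ne _ _ _ _ _ _ hne]
                exact hv
            · rw [if_neg hO]
              exact hv
          · by_cases hO : (pvCell place (x + dx) (y + dy) == 'O') = true
            · rw [if_pos hO]
              have hxne : ¬(x = x + dx ∧ y = y + dy) := by
                intro hh
                exact pvDir_ne x y (dx, dy) hhd (by simp [← hh.1, ← hh.2])
              rw [pvUpd_ne _ _ _ _ _ _ hxne]
              exact hd1
            · rw [if_neg hO]
              exact hd1
      · rw [if_neg hc]
        exact ih _ _ _ _ hsub' he' hi1 hi2 hv hP hd1



theorem pvLoop_succ (place : List String) (fuel : Nat) (x y : Int) (rest : List (Int × Int))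
    (v : Int → Int → Bool) (d : Int → Int → Int) :
    pvLoop place (fuel + 1) ((x, y) :: rest) v d =
      match pvStep place x y pvDirs rest v d with
      | none => true
      | some (q', v', d') => pvLoop place fuel q' v' d' := rfl

theorem pvAdj_mem_dirs (e : Int × Int) (h : e ∈ pvAdjD) : e ∈ pvDirs := by
  fin_cases h <;> decide

theorem pvDirs_mem_adj (e : Int × Int) (h : e ∈ pvDirs) : e ∈ pvAdjD := by
  fin_cases h <;> decide

theorem pvKP_two' (place : List String) (a b u w : Int) (hd : (u, w) ∈ pvTwoD)
    (h1 : pvInb (a + u) = true) (h2 : pvInb (b + w) = true)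
    (hP : pvCell place (a + u) (b + w) = 'P')
    (hO : pvCell place (a + PySem.Int.floordiv u 2) (b + PySem.Int.floordiv w 2) = 'O') :
    pvKP place a b :=
  Or.inr (Or.inl ⟨(u, w), hd, h1, h2, hP, hO⟩)

theorem pvKP_diag' (place : List String) (a b u w : Int) (hd : (u, w) ∈ pvDiagD)
    (h1 : pvInb (a + u) = true) (h2 : pvInb (b + w) = true)
    (hP : pvCell place (a + u) (b + w) = 'P')
    (hOr : pvCell place a (b + w) = 'O' ∨ pvCell place (a + u) b = 'O') :
    pvKP place a b :=
  Or.inr (Or.inr ⟨(u, w), hd, h1, h2, hP, hOr⟩)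

theorem pvInv_step (place : List String) (a b x y : Int) (rest : List (Int × Int)) v d q' v' d'
    (hinv : pvInv place a b ((x, y) :: rest) v d)
    (hstep : pvStep place x y pvDirs rest v d = some (q', v', d')) :
    pvInv place a b q' v' d' := by
  obtain ⟨hva, hvO, hq⟩ := hinv
  obtain ⟨hvh, hd0, hd0e, hd1e⟩ := hq (x, y) List.mem_cons_self
  have hd0' : 0 ≤ d x y := hd0
  have hrest : ∀ m ∈ rest, v m.1 m.2 = true ∧ 0 ≤ d m.1 m.2 ∧
      (d m.1 m.2 = 0 → m = (a, b)) ∧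
      (d m.1 m.2 = 1 → pvCell place m.1 m.2 = 'O' ∧ ∃ e ∈ pvDirs, m = (a + e.1, b + e.2)) :=
    fun m hm => hq m (List.mem_cons_of_mem _ hm)
  obtain ⟨g1, g2, g3, g4, g5, g6, g7⟩ :=
    pvStep_some place x y pvDirs rest v d q' v' d' (List.Sublist.refl _) hstep
  refine ⟨g1 _ _ hva, ?_, ?_⟩
  · intro i j hv
    rcases g2 i j hv with hv' | hO
    · exact hvO i j hv'
    · exact Or.inr hO
  · intro m hm
    rcases g5 m hm with hm' | ⟨hOm, hvm, hdm, e, he, hme⟩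
    · obtain ⟨h1, h2, h3, h4⟩ := hrest m hm'
      exact ⟨g1 _ _ h1, by rw [g3 _ _ h1]; exact h2, by rw [g3 _ _ h1]; exact h3,
        by rw [g3 _ _ h1]; exact h4⟩
    · refine ⟨hvm, by rw [hdm]; omega, by rw [hdm]; intro hh; omega, ?_⟩
      rw [hdm]
      intro hh
      have hdxy : d x y = 0 := by omega
      have hab := hd0e hdxy
      rw [Prod.mk.injEq] at hab
      refine ⟨hOm, e, he, ?_⟩
      rw [hme, hab.1, hab.2]


-- producing the neighbourhood condition from a mid-cell configuration (16-way case split)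
theorem pvKP_of_mid (place : List String) (a b : Int) (e f : Int × Int)
    (he : e ∈ pvDirs) (hf : f ∈ pvDirs)
    (h1 : pvInb (a + e.1 + f.1) = true) (h2 : pvInb (b + e.2 + f.2) = true)
    (hP : pvCell place (a + e.1 + f.1) (b + e.2 + f.2) = 'P')
    (hO : pvCell place (a + e.1) (b + e.2) = 'O')
    (hne : (a + e.1 + f.1, b + e.2 + f.2) ≠ (a, b)) :
    pvKP place a b := by
  obtain ⟨e1, e2⟩ := e
  obtain ⟨f1, f2⟩ := f
  fin_cases he <;> fin_cases hf
  -- e = (-1,0)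
  · refine pvKP_two' place a b (-2) 0 (by decide) ?_ ?_ ?_ ?_
    · rw [pvInb_iff] at h1 ⊢; simp only at h1; omega
    · rw [pvInb_iff] at h2 ⊢; simp only at h2; omega
    · convert hP using 2 <;> ring
    · rw [show PySem.Int.floordiv (-2) 2 = (-1 : Int) from by decide,
        show PySem.Int.floordiv 0 2 = (0 : Int) from by decide]
      exact hO
  · refine pvKP_diag' place a b (-1) (-1) (by decide) ?_ ?_ ?_ (Or.inr ?_)
    · rw [pvInb_iff] at h1 ⊢; simp only at h1; omega
    · rw [pvInb_iff] at h2 ⊢; simp only at h2; omega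
    · convert hP using 2 <;> ring
    · convert hO using 2 <;> ring
  · exact absurd (Prod.ext (by omega) (by omega)) hne
  · refine pvKP_diag' place a b (-1) 1 (by decide) ?_ ?_ ?_ (Or.inr ?_)
    · rw [pvInb_iff] at h1 ⊢; simp only at h1; omega
    · rw [pvInb_iff] at h2 ⊢; simp only at h2; omega
    · convert hP using 2 <;> ring
    · convert hO using 2 <;> ring
  -- e = (0,-1)
  · refine pvKP_diag' place a b (-1) (-1) (by decide) ?_ ?_ ?_ (Or.inl ?_)
    · rw [pvInb_iff] at h1 ⊢; simp only at h1; omega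
    · rw [pvInb_iff] at h2 ⊢; simp only at h2; omega
    · convert hP using 2 <;> ring
    · convert hO using 2 <;> ring
  · refine pvKP_two' place a b 0 (-2) (by decide) ?_ ?_ ?_ ?_
    · rw [pvInb_iff] at h1 ⊢; simp only at h1; omega
    · rw [pvInb_iff] at h2 ⊢; simp only at h2; omega
    · convert hP using 2 <;> ring
    · rw [show PySem.Int.floordiv 0 2 = (0 : Int) from by decide,
        show PySem.Int.floordiv (-2) 2 = (-1 : Int) from by decide]
      exact hO
  · refine pvKP_diag' place a b 1 (-1) (by decide) ?_ ?_ ?_ (Or.inl ?_)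
    · rw [pvInb_iff] at h1 ⊢; simp only at h1; omega
    · rw [pvInb_iff] at h2 ⊢; simp only at h2; omega
    · convert hP using 2 <;> ring
    · convert hO using 2 <;> ring
  · exact absurd (Prod.ext (by omega) (by omega)) hne
  -- e = (1,0)
  · exact absurd (Prod.ext (by omega) (by omega)) hne
  · refine pvKP_diag' place a b 1 (-1) (by decide) ?_ ?_ ?_ (Or.inr ?_)
    · rw [pvInb_iff] at h1 ⊢; simp only at h1; omega
    · rw [pvInb_iff] at h2 ⊢; simp only at h2; omega
    · convert hP using 2 <;> ring
    · convert hO using 2 <;> ring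
  · refine pvKP_two' place a b 2 0 (by decide) ?_ ?_ ?_ ?_
    · rw [pvInb_iff] at h1 ⊢; simp only at h1; omega
    · rw [pvInb_iff] at h2 ⊢; simp only at h2; omega
    · convert hP using 2 <;> ring
    · rw [show PySem.Int.floordiv 2 2 = (1 : Int) from by decide,
        show PySem.Int.floordiv 0 2 = (0 : Int) from by decide]
      exact hO
  · refine pvKP_diag' place a b 1 1 (by decide) ?_ ?_ ?_ (Or.inr ?_)
    · rw [pvInb_iff] at h1 ⊢; simp only at h1; omega
    · rw [pvInb_iff] at h2 ⊢; simp only at h2; omega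
    · convert hP using 2 <;> ring
    · convert hO using 2 <;> ring
  -- e = (0,1)
  · refine pvKP_diag' place a b (-1) 1 (by decide) ?_ ?_ ?_ (Or.inl ?_)
    · rw [pvInb_iff] at h1 ⊢; simp only at h1; omega
    · rw [pvInb_iff] at h2 ⊢; simp only at h2; omega
    · convert hP using 2 <;> ring
    · convert hO using 2 <;> ring
  · exact absurd (Prod.ext (by omega) (by omega)) hne
  · refine pvKP_diag' place a b 1 1 (by decide) ?_ ?_ ?_ (Or.inl ?_)
    · rw [pvInb_iff] at h1 ⊢; simp only at h1; omega
    · rw [pvInb_iff] at h2 ⊢; simp only at h2; omega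
    · convert hP using 2 <;> ring
    · convert hO using 2 <;> ring
  · refine pvKP_two' place a b 0 2 (by decide) ?_ ?_ ?_ ?_
    · rw [pvInb_iff] at h1 ⊢; simp only at h1; omega
    · rw [pvInb_iff] at h2 ⊢; simp only at h2; omega
    · convert hP using 2 <;> ring
    · rw [show PySem.Int.floordiv 0 2 = (0 : Int) from by decide,
        show PySem.Int.floordiv 2 2 = (1 : Int) from by decide]
      exact hO


theorem pvLoop_sound (place : List String) (a b : Int) :
    ∀ (fuel : Nat) q v d, pvInv place a b q v d →
    pvLoop place fuel q v d = true → pvKP place a b := by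
  intro fuel
  induction fuel with
  | zero =>
    intro q v d hinv h
    cases q with
    | nil => simp [pvLoop] at h
    | cons hd rest =>
      obtain ⟨x, y⟩ := hd
      simp [pvLoop] at h
  | succ n ih =>
    intro q v d hinv h
    cases q with
    | nil => simp [pvLoop] at h
    | cons hd rest =>
      obtain ⟨x, y⟩ := hd
      rw [pvLoop_succ] at h
      cases hstep : pvStep place x y pvDirs rest v d with
      | none =>
        obtain ⟨e, he, hi1, hi2, hve, hPe, hdle⟩ :=
          pvStep_none_sound place x y pvDirs rest v d (List.Sublist.refl _) hstep
        obtain ⟨hvh, hd0, hd0e, hd1e⟩ := hinv.2.2 (x, y) List.mem_cons_self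
        have hcase : d x y = 0 ∨ d x y = 1 := by
          simp only at hd0
          omega
        rcases hcase with h0 | h1
        · have hab := hd0e h0
          rw [Prod.mk.injEq] at hab
          obtain ⟨rfl, rfl⟩ := hab
          exact Or.inl ⟨e, pvDirs_mem_adj e he, hi1, hi2, hPe⟩
        · obtain ⟨hOxy, e0, he0, hm⟩ := hd1e h1
          rw [Prod.mk.injEq] at hm
          obtain ⟨rfl, rfl⟩ := hm
          have hne : (a + e0.1 + e.1, b + e0.2 + e.2) ≠ (a, b) := by
            intro hh
            rw [Prod.mk.injEq] at hh
            rw [hh.1, hh.2, hinv.1] at hve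
            cases hve
          exact pvKP_of_mid place a b e0 e he0 he hi1 hi2 hPe hOxy hne
      | some t =>
        obtain ⟨q1, v1, d1⟩ := t
        rw [hstep] at h
        exact ih q1 v1 d1 (pvInv_step place a b x y rest v d q1 v1 d1 hinv hstep) h


theorem pvLoop_complete (place : List String) (a b : Int) :
    ∀ (fuel : Nat) (q : List (Int × Int)) v d (m e : Int × Int),
    pvInv place a b q v d → q.length + pvUc v ≤ fuel →
    m ∈ q → d m.1 m.2 ≤ 1 → e ∈ pvDirs →
    pvInb (m.1 + e.1) = true → pvInb (m.2 + e.2) = true →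
    pvCell place (m.1 + e.1) (m.2 + e.2) = 'P' → (m.1 + e.1, m.2 + e.2) ≠ (a, b) →
    pvLoop place fuel q v d = true := by
  intro fuel
  induction fuel with
  | zero =>
    intro q v d m e hinv hfuel hm _ _ _ _ _ _
    have : 0 < q.length := List.length_pos_iff.mpr (List.ne_nil_of_mem hm)
    omega
  | succ n ih =>
    intro q v d m e hinv hfuel hm hdm he hi1 hi2 hP hne
    cases q with
    | nil => simp at hm
    | cons hd rest =>
      obtain ⟨x, y⟩ := hd
      rw [pvLoop_succ]
      cases hstep : pvStep place x y pvDirs rest v d with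
      | none => rfl
      | some t =>
        obtain ⟨q1, v1, d1⟩ := t
        rcases List.mem_cons.mp hm with rfl | hmr
        · exfalso
          have hv : v ((x, y).1 + e.1) ((x, y).2 + e.2) = false := by
            cases hvt : v ((x, y).1 + e.1) ((x, y).2 + e.2)
            · rfl
            · exfalso
              rcases hinv.2.1 _ _ hvt with ⟨ha1, ha2⟩ | hO
              · exact hne (Prod.ext ha1 ha2)
              · rw [hP] at hO
                exact absurd hO (by decide)
          have hnone := pvStep_none_of_trigger place x y pvDirs rest v d e
            (List.Sublist.refl _) he hi1 hi2 hv hP hdm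
          rw [hnone] at hstep
          cases hstep
        · obtain ⟨g1, g2, g3, g4, g5, g6, g7⟩ :=
            pvStep_some place x y pvDirs rest v d q1 v1 d1 (List.Sublist.refl _) hstep
          have hvm : v m.1 m.2 = true := (hinv.2.2 m hm).1
          apply ih q1 v1 d1 m e
            (pvInv_step place a b x y rest v d q1 v1 d1 hinv hstep) ?_ (g4 m hmr)
            (by rw [g3 _ _ hvm]; exact hdm) he hi1 hi2 hP hne
          simp only [List.length_cons] at hfuel
          omega


theorem pvInv_init (place : List String) (a b : Int) :
    pvInv place a b [(a, b)] (pvUpd (fun _ _ => false) a b true) (fun _ _ => 0) := by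
  refine ⟨by simp [pvUpd], ?_, ?_⟩
  · intro x y hv
    by_cases h : x = a ∧ y = b
    · exact Or.inl h
    · simp [pvUpd, h] at hv
  · intro m hm
    rcases List.mem_singleton.mp hm with rfl
    exact ⟨by simp [pvUpd], by simp, fun _ => rfl, fun h => by simp at h⟩


theorem pvUc_init (a b : Int) (ha : pvInb a = true) (hb : pvInb b = true) :
    pvUc (pvUpd (fun _ _ => false) a b true) = 24 := by
  have h := pvUc_upd (fun _ _ => false) a b ha hb rfl
  have h25 : pvUc (fun _ _ => false) = 25 := by decide
  omega


-- B finds a pair ⇒ A's BFS returns 0: adjacency case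
theorem pvReach1 (place : List String) (a b : Int) (e : Int × Int)
    (ha : pvInb a = true) (hb : pvInb b = true)
    (he : e ∈ pvDirs)
    (h1 : pvInb (a + e.1) = true) (h2 : pvInb (b + e.2) = true)
    (hP : pvCell place (a + e.1) (b + e.2) = 'P') :
    pvBfsFrom place (a, b) = true := by
  have huc := pvUc_init a b ha hb
  apply pvLoop_complete place a b 25 [(a, b)] _ _ (a, b) e (pvInv_init place a b)
    (by rw [huc]; simp) (List.mem_singleton_self _) (by norm_num) he h1 h2 hP
    (pvDir_ne a b e he)


-- B finds a pair ⇒ A's BFS returns 0: distance-2 case through an 'O' middle cell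
theorem pvReach2 (place : List String) (a b : Int) (ec f : Int × Int)
    (ha : pvInb a = true) (hb : pvInb b = true)
    (hec : ec ∈ pvDirs) (hf : f ∈ pvDirs)
    (hm1 : pvInb (a + ec.1) = true) (hm2 : pvInb (b + ec.2) = true)
    (hO : pvCell place (a + ec.1) (b + ec.2) = 'O')
    (h1 : pvInb (a + ec.1 + f.1) = true) (h2 : pvInb (b + ec.2 + f.2) = true)
    (hP : pvCell place (a + ec.1 + f.1) (b + ec.2 + f.2) = 'P')
    (hne : (a + ec.1 + f.1, b + ec.2 + f.2) ≠ (a, b)) :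
    pvBfsFrom place (a, b) = true := by
  have huc := pvUc_init a b ha hb
  show pvLoop place 25 [(a, b)] (pvUpd (fun _ _ => false) a b true) (fun _ _ => 0) = true
  rw [show (25 : Nat) = 24 + 1 from rfl, pvLoop_succ]
  cases hstep : pvStep place a b pvDirs [] (pvUpd (fun _ _ => false) a b true) (fun _ _ => 0) with
  | none => rfl
  | some t =>
    obtain ⟨q1, v1, d1⟩ := t
    obtain ⟨g1, g2, g3, g4, g5, g6, g7⟩ := pvStep_some place a b pvDirs []
      (pvUpd (fun _ _ => false) a b true) (fun _ _ => 0) q1 v1 d1 (List.Sublist.refl _) hstep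
    have hcne : ¬(a + ec.1 = a ∧ b + ec.2 = b) := by
      intro hh
      exact pvDir_ne a b ec hec (Prod.ext hh.1 hh.2)
    have hv0 : pvUpd (fun _ _ => false) a b true (a + ec.1) (b + ec.2) = false := by
      rw [pvUpd_ne _ _ _ _ _ _ hcne]
    obtain ⟨hmem, hdval⟩ := g7 ec hec hm1 hm2 hv0 hO
    apply pvLoop_complete place a b 24 q1 v1 d1 (a + ec.1, b + ec.2) f
      (pvInv_step place a b a b [] _ _ q1 v1 d1 (pvInv_init place a b) hstep)
      ?_ hmem (by rw [hdval]; norm_num) hf h1 h2 hP hne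
    simp only [List.length_nil] at g6
    rw [huc] at g6
    omega


theorem pvBfsFrom_iff (place : List String) (a b : Int)
    (ha : pvInb a = true) (hb : pvInb b = true) :
    pvBfsFrom place (a, b) = true ↔ pvKP place a b := by
  constructor
  · intro h
    exact pvLoop_sound place a b 25 _ _ _ (pvInv_init place a b) h
  · intro hk
    rcases hk with ⟨e, he, h1, h2, hP⟩ | ⟨dd, hdd, h1, h2, hP, hO⟩ | ⟨dd, hdd, h1, h2, hP, hOr⟩
    · exact pvReach1 place a b e ha hb (pvAdj_mem_dirs e he) h1 h2 hP
    · obtain ⟨u, w⟩ := dd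
      fin_cases hdd
      · -- (2,0): middle (1,0) then (1,0)
        rw [show PySem.Int.floordiv (2 : Int) 2 = (1 : Int) from by decide,
          show PySem.Int.floordiv (0 : Int) 2 = (0 : Int) from by decide] at hO
        refine pvReach2 place a b (1, 0) (1, 0) ha hb (by decide) (by decide) ?_ ?_ hO ?_ ?_ ?_ ?_
        · rw [pvInb_iff] at h1 ha ⊢; omega
        · rw [pvInb_iff] at h2 hb ⊢; omega
        · rw [pvInb_iff] at h1 ⊢; omega
        · rw [pvInb_iff] at h2 ⊢; omega
        · convert hP using 2 <;> ring
        · intro hh; rw [Prod.mk.injEq] at hh; omega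
      · -- (-2,0)
        rw [show PySem.Int.floordiv (-2 : Int) 2 = (-1 : Int) from by decide,
          show PySem.Int.floordiv (0 : Int) 2 = (0 : Int) from by decide] at hO
        refine pvReach2 place a b (-1, 0) (-1, 0) ha hb (by decide) (by decide) ?_ ?_ hO ?_ ?_ ?_ ?_
        · rw [pvInb_iff] at h1 ha ⊢; omega
        · rw [pvInb_iff] at h2 hb ⊢; omega
        · rw [pvInb_iff] at h1 ⊢; omega
        · rw [pvInb_iff] at h2 ⊢; omega
        · convert hP using 2 <;> ring
        · intro hh; rw [Prod.mk.injEq] at hh; omega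
      · -- (0,2)
        rw [show PySem.Int.floordiv (0 : Int) 2 = (0 : Int) from by decide,
          show PySem.Int.floordiv (2 : Int) 2 = (1 : Int) from by decide] at hO
        refine pvReach2 place a b (0, 1) (0, 1) ha hb (by decide) (by decide) ?_ ?_ hO ?_ ?_ ?_ ?_
        · rw [pvInb_iff] at h1 ha ⊢; omega
        · rw [pvInb_iff] at h2 hb ⊢; omega
        · rw [pvInb_iff] at h1 ⊢; omega
        · rw [pvInb_iff] at h2 ⊢; omega
        · convert hP using 2 <;> ring
        · intro hh; rw [Prod.mk.injEq] at hh; omega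
      · -- (0,-2)
        rw [show PySem.Int.floordiv (0 : Int) 2 = (0 : Int) from by decide,
          show PySem.Int.floordiv (-2 : Int) 2 = (-1 : Int) from by decide] at hO
        refine pvReach2 place a b (0, -1) (0, -1) ha hb (by decide) (by decide) ?_ ?_ hO ?_ ?_ ?_ ?_
        · rw [pvInb_iff] at h1 ha ⊢; omega
        · rw [pvInb_iff] at h2 hb ⊢; omega
        · rw [pvInb_iff] at h1 ⊢; omega
        · rw [pvInb_iff] at h2 ⊢; omega
        · convert hP using 2 <;> ring
        · intro hh; rw [Prod.mk.injEq] at hh; omega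
    · obtain ⟨u, w⟩ := dd
      fin_cases hdd <;> rcases hOr with hO | hO
      · -- (1,1), O at (a, b+1): ec=(0,1), f=(1,0)
        refine pvReach2 place a b (0, 1) (1, 0) ha hb (by decide) (by decide) ?_ ?_ ?_ ?_ ?_ ?_ ?_
        · rw [pvInb_iff] at ha ⊢; omega
        · rw [pvInb_iff] at h2 hb ⊢; omega
        · convert hO using 2 <;> ring
        · rw [pvInb_iff] at h1 ⊢; omega
        · rw [pvInb_iff] at h2 ⊢; omega
        · convert hP using 2 <;> ring
        · intro hh; rw [Prod.mk.injEq] at hh; omega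
      · -- (1,1), O at (a+1, b): ec=(1,0), f=(0,1)
        refine pvReach2 place a b (1, 0) (0, 1) ha hb (by decide) (by decide) ?_ ?_ ?_ ?_ ?_ ?_ ?_
        · rw [pvInb_iff] at h1 ha ⊢; omega
        · rw [pvInb_iff] at hb ⊢; omega
        · convert hO using 2 <;> ring
        · rw [pvInb_iff] at h1 ⊢; omega
        · rw [pvInb_iff] at h2 ⊢; omega
        · convert hP using 2 <;> ring
        · intro hh; rw [Prod.mk.injEq] at hh; omega
      · -- (1,-1), O at (a, b-1): ec=(0,-1), f=(1,0)
        refine pvReach2 place a b (0, -1) (1, 0) ha hb (by decide) (by decide) ?_ ?_ ?_ ?_ ?_ ?_ ?_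
        · rw [pvInb_iff] at ha ⊢; omega
        · rw [pvInb_iff] at h2 hb ⊢; omega
        · convert hO using 2 <;> ring
        · rw [pvInb_iff] at h1 ⊢; omega
        · rw [pvInb_iff] at h2 ⊢; omega
        · convert hP using 2 <;> ring
        · intro hh; rw [Prod.mk.injEq] at hh; omega
      · -- (1,-1), O at (a+1, b): ec=(1,0), f=(0,-1)
        refine pvReach2 place a b (1, 0) (0, -1) ha hb (by decide) (by decide) ?_ ?_ ?_ ?_ ?_ ?_ ?_
        · rw [pvInb_iff] at h1 ha ⊢; omega
        · rw [pvInb_iff] at hb ⊢; omega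
        · convert hO using 2 <;> ring
        · rw [pvInb_iff] at h1 ⊢; omega
        · rw [pvInb_iff] at h2 ⊢; omega
        · convert hP using 2 <;> ring
        · intro hh; rw [Prod.mk.injEq] at hh; omega
      · -- (-1,1), O at (a, b+1): ec=(0,1), f=(-1,0)
        refine pvReach2 place a b (0, 1) (-1, 0) ha hb (by decide) (by decide) ?_ ?_ ?_ ?_ ?_ ?_ ?_
        · rw [pvInb_iff] at ha ⊢; omega
        · rw [pvInb_iff] at h2 hb ⊢; omega
        · convert hO using 2 <;> ring
        · rw [pvInb_iff] at h1 ⊢; omega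
        · rw [pvInb_iff] at h2 ⊢; omega
        · convert hP using 2 <;> ring
        · intro hh; rw [Prod.mk.injEq] at hh; omega
      · -- (-1,1), O at (a-1, b): ec=(-1,0), f=(0,1)
        refine pvReach2 place a b (-1, 0) (0, 1) ha hb (by decide) (by decide) ?_ ?_ ?_ ?_ ?_ ?_ ?_
        · rw [pvInb_iff] at h1 ha ⊢; omega
        · rw [pvInb_iff] at hb ⊢; omega
        · convert hO using 2 <;> ring
        · rw [pvInb_iff] at h1 ⊢; omega
        · rw [pvInb_iff] at h2 ⊢; omega
        · convert hP using 2 <;> ring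
        · intro hh; rw [Prod.mk.injEq] at hh; omega
      · -- (-1,-1), O at (a, b-1): ec=(0,-1), f=(-1,0)
        refine pvReach2 place a b (0, -1) (-1, 0) ha hb (by decide) (by decide) ?_ ?_ ?_ ?_ ?_ ?_ ?_
        · rw [pvInb_iff] at ha ⊢; omega
        · rw [pvInb_iff] at h2 hb ⊢; omega
        · convert hO using 2 <;> ring
        · rw [pvInb_iff] at h1 ⊢; omega
        · rw [pvInb_iff] at h2 ⊢; omega
        · convert hP using 2 <;> ring
        · intro hh; rw [Prod.mk.injEq] at hh; omega
      · -- (-1,-1), O at (a-1, b): ec=(-1,0), f=(0,-1)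
        refine pvReach2 place a b (-1, 0) (0, -1) ha hb (by decide) (by decide) ?_ ?_ ?_ ?_ ?_ ?_ ?_
        · rw [pvInb_iff] at h1 ha ⊢; omega
        · rw [pvInb_iff] at hb ⊢; omega
        · convert hO using 2 <;> ring
        · rw [pvInb_iff] at h1 ⊢; omega
        · rw [pvInb_iff] at h2 ⊢; omega
        · convert hP using 2 <;> ring
        · intro hh; rw [Prod.mk.injEq] at hh; omega


theorem pvRun_eq (place : List String) :
    ∀ l, pvRun place l = if l.any (pvBfsFrom place) then 0 else 1 := by
  intro l
  induction l with
  | nil => simp [pvRun]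
  | cons s rest ih =>
    by_cases hb : pvBfsFrom place s = true
    · rw [if_pos (by simp [hb])]
      simp [pvRun, hb]
    · have hb' : pvBfsFrom place s = false := by simpa using hb
      by_cases hr : rest.any (pvBfsFrom place) = true
      · rw [if_pos (by simp [hr])]
        simp [pvRun, hb', ih, hr]
      · have hr' : rest.any (pvBfsFrom place) = false := by simpa using hr
        rw [if_neg (by simp [hb', hr'])]
        simp [pvRun, hb', ih, hr']


theorem pvStarts_any (place : List String) (f : Int × Int → Bool) :
    (pvStarts place).any f =
      (PySem.List.pyRange 0 5 1).any fun i =>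
        (PySem.List.pyRange 0 5 1).any fun j => (pvCell place i j == 'P') && f (i, j) := by
  have inner : ∀ (i : Int) (l : List Int) (acc : List (Int × Int)),
      ((l.foldl (fun acc j => if pvCell place i j == 'P' then acc ++ [(i, j)] else acc) acc).any f)
        = (acc.any f || l.any fun j => (pvCell place i j == 'P') && f (i, j)) := by
    intro i l
    induction l with
    | nil => intro acc; simp
    | cons hd tl ih =>
      intro acc
      simp only [List.foldl_cons, List.any_cons]
      by_cases h : pvCell place i hd == 'P'
      · simp only [h, if_true, ih, List.any_append, List.any_cons, List.any_nil]
        cases f (i, hd) <;> simp [h] <;> cases acc.any f <;> simp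
      · simp only [h, Bool.false_and, if_false, ih]
        simp at h
        simp [h]
  have outer : ∀ (l : List Int) (acc : List (Int × Int)),
      ((l.foldl (fun acc i => (PySem.List.pyRange 0 5 1).foldl
          (fun acc j => if pvCell place i j == 'P' then acc ++ [(i, j)] else acc) acc) acc).any f)
        = (acc.any f || l.any fun i =>
            (PySem.List.pyRange 0 5 1).any fun j => (pvCell place i j == 'P') && f (i, j)) := by
    intro l
    induction l with
    | nil => intro acc; simp
    | cons hd tl ih =>
      intro acc
      simp only [List.foldl_cons, List.any_cons, ih, inner]
      cases acc.any f <;> simp [Bool.or_assoc]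
  unfold pvStarts
  simpa using outer (PySem.List.pyRange 0 5 1) []


theorem pvAny_congr {α : Type} (l : List α) (f g : α → Bool)
    (h : ∀ x ∈ l, f x = g x) : l.any f = l.any g := by
  induction l with
  | nil => rfl
  | cons hd tl ih =>
    simp only [List.any_cons, h hd List.mem_cons_self,
      ih fun x hx => h x (List.mem_cons_of_mem _ hx)]

-- ===== VERDICT (by name: the statement is the Claim_ definition above) =====
theorem bfs_spec : Claim_equal_bfs := by
  intro place _ _
  show bfs place = bfs_alt place
  rw [bfs, pvRun_eq, pvStarts_any, bfs_alt]
  have hcond : ((PySem.List.pyRange 0 5 1).any fun i =>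
        (PySem.List.pyRange 0 5 1).any fun j =>
          (pvCell place i j == 'P') && pvBfsFrom place (i, j)) =
      ((PySem.List.pyRange 0 5 1).any fun i =>
        (PySem.List.pyRange 0 5 1).any fun j => pvCheck place i j) := by
    apply pvAny_congr
    intro i hi
    apply pvAny_congr
    intro j hj
    have hib : pvInb i = true := by
      rw [pvInb_iff]
      have := PySem.List.mem_pyRange_one.mp hi
      omega
    have hjb : pvInb j = true := by
      rw [pvInb_iff]
      have := PySem.List.mem_pyRange_one.mp hj
      omega
    by_cases hP : pvCell place i j = 'P'
    · have hPb : (pvCell place i j == 'P') = true := by simp [hP]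
      rw [hPb, Bool.true_and]
      cases hb : pvBfsFrom place (i, j) with
      | false =>
        cases hcb : pvCheck place i j with
        | false => rfl
        | true =>
          exfalso
          have hk := ((pvCheck_iff place i j).mp hcb).2
          have hcontra := (pvBfsFrom_iff place i j hib hjb).mpr hk
          rw [hb] at hcontra
          cases hcontra
      | true =>
        have hk := (pvBfsFrom_iff place i j hib hjb).mp hb
        exact ((pvCheck_iff place i j).mpr ⟨hP, hk⟩).symm
    · have hPb : (pvCell place i j == 'P') = false := by simp [hP]
      rw [hPb, Bool.false_and]
      cases hcb : pvCheck place i j with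
      | false => rfl
      | true => exact absurd ((pvCheck_iff place i j).mp hcb).1 hP
  rw [hcond]
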